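-- pv_equiv track=rewrite | github.com/lsnpl10/Algos_K_Ano | k-anonymity-main/utils/data.py | restore_column_order
-- ===== SOURCE A (Python) =====
-- def restore_column_order(data, qi_index):
--     res = []
--     for row in data:
--         new_row = row[len(qi_index):]
--         for i, elem in zip(qi_index, row[:len(qi_index)]):
--             new_row.insert(i, elem)
--         res.append(new_row)
--     return res
-- ===== SOURCE B (Python) =====
-- def restore_column_order(data, qi_index):
--     def weave(pairs, row):
--         if not pairs:
--             return row
--         i, elem = pairs[0]
--         return weave(pairs[1:], row[:i] + [elem] + row[i:])
--     k = len(qi_index)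
--     return [weave(list(zip(qi_index, row[:k])), row[k:]) for row in data]
-- ===== Notes on version B (the rewrite author's own statement) =====
-- stated objective: alternative
-- what changed: A builds each row by mutating a list with repeated in-place list.insert calls inside an explicit accumulator loop; B is a pure functional rewrite: a recursive helper threads an immutable row through slice-concatenation (row[:i] + [elem] + row[i:]) and a list comprehension replaces the outer accumulation.
import Mathlib
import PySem

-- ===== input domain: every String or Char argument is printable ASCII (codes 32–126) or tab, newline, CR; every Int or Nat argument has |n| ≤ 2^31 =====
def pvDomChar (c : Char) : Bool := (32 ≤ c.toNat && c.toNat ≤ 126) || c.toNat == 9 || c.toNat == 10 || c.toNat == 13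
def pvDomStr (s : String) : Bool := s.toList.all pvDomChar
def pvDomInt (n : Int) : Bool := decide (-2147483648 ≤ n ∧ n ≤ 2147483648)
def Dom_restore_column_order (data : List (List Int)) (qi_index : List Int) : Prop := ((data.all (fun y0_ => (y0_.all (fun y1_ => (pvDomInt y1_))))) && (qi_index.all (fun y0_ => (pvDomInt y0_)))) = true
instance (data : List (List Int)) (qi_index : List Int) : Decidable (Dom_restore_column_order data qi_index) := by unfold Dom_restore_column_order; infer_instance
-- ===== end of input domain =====

-- B is a pure functional rewrite of A: per-row recursion threading an immutable row through
-- slice-concatenation instead of a loop of in-place list.insert calls, and a comprehension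
-- instead of an accumulator (objective: alternative; same return value on every input).

-- ===== PORT A =====
def restore_column_order (data : List (List Int)) (qi_index : List Int) : List (List Int) :=
  data.foldl (fun res row =>
    let new_row := PySem.List.slice row (some (qi_index.length : Int)) none
    res ++ [(List.zip qi_index (PySem.List.slice row none (some (qi_index.length : Int)))).foldl
      (fun nr pe => PySem.List.insert nr pe.1 pe.2) new_row]) []

-- ===== PORT B =====
-- Source B's recursive helper 'weave'
def pvWeave (pairs : List (Int × Int)) (row : List Int) : List Int :=
  match pairs with
  | [] => row
  | pe :: rest =>
    pvWeave rest (PySem.List.slice row none (some pe.1) ++ [pe.2] ++ PySem.List.slice row (some pe.1) none)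

def restore_column_order_alt (data : List (List Int)) (qi_index : List Int) : List (List Int) :=
  let k := qi_index.length
  data.map (fun row =>
    pvWeave (List.zip qi_index (PySem.List.slice row none (some (k : Int))))
      (PySem.List.slice row (some (k : Int)) none))

-- ===== PRECONDITION & SPEC =====
def Spec_restore_column_order (data : List (List Int)) (qi_index : List Int) (out : List (List Int)) : Prop := out = restore_column_order_alt data qi_index
instance (data : List (List Int)) (qi_index : List Int) (out : List (List Int)) : Decidable (Spec_restore_column_order data qi_index out) := by unfold Spec_restore_column_order; infer_instance

-- ===== CLAIM (what is proved, stated in full; the proofs are below) =====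
def Claim_equal_restore_column_order : Prop := ∀ (data : List (List Int)) (qi_index : List Int), Dom_restore_column_order data qi_index → Spec_restore_column_order data qi_index (restore_column_order data qi_index)

-- ===== LEMMAS AND PROOFS =====
theorem tk {α : Type} (l : List α) (p : Nat) (v : α) (h : p ≤ l.length) :
    l.insertIdx p v = l.take p ++ v :: l.drop p := by
  induction l generalizing p with
  | nil => simp at h; simp [h]
  | cons a t ih =>
    cases p with
    | zero => simp
    | succ p => simp only [List.insertIdx_succ_cons, List.take_succ_cons, List.drop_succ_cons,
        List.cons_append]; rw [ih p (by simpa using h)]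

theorem pv_insert_eq_insertIdx (xs : List Int) (i : Int) (v : Int) :
    PySem.List.insert xs i v = xs.insertIdx (PySem.List.clampIdx xs.length i) v := by
  have hidx : (if i < 0 then max (i + (xs.length:Int)) 0 else min i (xs.length:Int)).toNat
      = PySem.List.clampIdx xs.length i := by
    simp only [PySem.List.clampIdx]; split_ifs <;> omega
  rw [tk _ _ _ (PySem.List.clampIdx_le _ _)]
  simp only [PySem.List.insert, PySem.List.sliceIndices]
  norm_num
  rw [hidx]

-- xs[:i] is the clamped take, for an arbitrary Int bound
theorem pv_slice_take (xs : List Int) (i : Int) :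
    PySem.List.slice xs none (some i) = xs.take (PySem.List.clampIdx xs.length i) := by
  simp only [PySem.List.slice, PySem.List.clampIdx]
  norm_num

-- row[:i] + [e] + row[i:] is exactly list.insert(i, e)
theorem pv_slice3 (xs : List Int) (i : Int) (e : Int) :
    PySem.List.slice xs none (some i) ++ [e] ++ PySem.List.slice xs (some i) none
      = PySem.List.insert xs i e := by
  rw [pv_insert_eq_insertIdx, tk _ _ _ (PySem.List.clampIdx_le _ _),
    pv_slice_take, PySem.List.slice_some_none]
  simp

-- Source B's recursion is A's per-row insert fold
theorem pv_weave_foldl (pairs : List (Int × Int)) : ∀ (row : List Int),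
    pvWeave pairs row = pairs.foldl (fun nr pe => PySem.List.insert nr pe.1 pe.2) row := by
  induction pairs with
  | nil => intro row; rfl
  | cons pe rest ih =>
    intro row
    rw [List.foldl_cons, ← pv_slice3 row pe.1 pe.2]
    exact ih _

-- A's outer accumulator loop is a map
theorem pv_foldl_map {α β : Type} (f : α → β) (l : List α) : ∀ (acc : List β),
    l.foldl (fun res row => res ++ [f row]) acc = acc ++ l.map f := by
  induction l with
  | nil => intro acc; simp
  | cons a t ih => intro acc; simp [ih]

-- ===== VERDICT (by name: the statement is the Claim_ definition above) =====
theorem restore_column_order_spec : Claim_equal_restore_column_order := by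
  intro data qi_index _
  show restore_column_order data qi_index = restore_column_order_alt data qi_index
  simp only [restore_column_order, restore_column_order_alt]
  rw [pv_foldl_map, List.nil_append]
  refine List.map_congr_left ?_
  intro row _
  rw [pv_weave_foldl]
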